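-- pv_equiv track=rewrite | github.com/PooriaT/oterminus | src/oterminus/structured_commands.py | _parse_uname_argv
-- ===== SOURCE A (Python) =====
-- from typing import Any, Sequence
--
-- def _parse_uname_argv(operands: list[str]) -> dict[str, Any] | None:
--     arguments: dict[str, Any] = {
--         "all": False,
--         "kernel_name": False,
--         "node_name": False,
--         "kernel_release": False,
--         "kernel_version": False,
--         "machine": False,
--     }
--     for operand in operands:
--         if operand.startswith("-") and operand != "-":
--             flags = _expand_short_flag_cluster(operand, {"a", "s", "n", "r", "v", "m"})
--             if flags is None:
--                 return None
--             for flag in flags: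
--                 if flag == "-a":
--                     arguments["all"] = True
--                 elif flag == "-s":
--                     arguments["kernel_name"] = True
--                 elif flag == "-n":
--                     arguments["node_name"] = True
--                 elif flag == "-r":
--                     arguments["kernel_release"] = True
--                 elif flag == "-v":
--                     arguments["kernel_version"] = True
--                 elif flag == "-m":
--                     arguments["machine"] = True
--             continue
--         return None
--     return arguments
--
-- def _expand_short_flag_cluster(token: str, allowed_flags: set[str]) -> list[str] | None:
--     if not token.startswith("-") or token.startswith("--") or len(token) < 2:
--         return None
--     flags = token[1:]
--     if not flags:
--         return None
--     expanded: list[str] = []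
--     for flag in flags:
--         if flag not in allowed_flags:
--             return None
--         expanded.append(f"-{flag}")
--     return expanded
-- ===== SOURCE B (Python) =====
-- _ALLOWED = "asnrvm"
--
-- def _parse_uname_argv(operands):
--     if any(len(t) < 2 or t[0] != "-" or t[1] == "-" for t in operands):
--         return None
--     chars = "".join(t[1:] for t in operands)
--     if not set(chars) <= set(_ALLOWED):
--         return None
--     return {
--         "all": "a" in chars,
--         "kernel_name": "s" in chars,
--         "node_name": "n" in chars,
--         "kernel_release": "r" in chars,
--         "kernel_version": "v" in chars,
--         "machine": "m" in chars,
--     }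
-- ===== Notes on version B (the rewrite author's own statement) =====
-- stated objective: simpler
-- what changed: B replaces A's per-token expand-to-'-x'-strings helper and per-flag elif chain with staged declarative passes: one any() shape check over all tokens, then all flag characters joined into a single string, one set-subset validation against the allowed letters, and the dict built once by substring-membership tests.
import Mathlib
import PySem

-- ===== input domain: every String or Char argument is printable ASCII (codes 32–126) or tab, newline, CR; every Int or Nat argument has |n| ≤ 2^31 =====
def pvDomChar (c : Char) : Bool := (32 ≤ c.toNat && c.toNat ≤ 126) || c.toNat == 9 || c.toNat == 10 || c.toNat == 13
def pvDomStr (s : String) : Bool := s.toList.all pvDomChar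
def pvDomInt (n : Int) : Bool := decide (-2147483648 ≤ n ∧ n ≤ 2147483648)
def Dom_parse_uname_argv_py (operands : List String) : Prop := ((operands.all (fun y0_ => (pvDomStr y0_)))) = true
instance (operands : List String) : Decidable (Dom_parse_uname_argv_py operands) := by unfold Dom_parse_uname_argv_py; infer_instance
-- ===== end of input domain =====

-- B replaces A's per-token flag-string expansion and elif chain by staged declarative passes:
-- shape check of every token, join of all flag chars, one set-subset validation, dict built
-- once by substring membership (simpler).

-- ===== PORT A =====
def pvAllowedA : PySem.Set Char := PySem.Set.ofList ['a', 's', 'n', 'r', 'v', 'm']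

-- the 'for flag in flags' loop of _expand_short_flag_cluster (f"-{flag}" = String.ofList ['-', flag])
def pvExpandLoop (allowed : PySem.Set Char) (expanded : List String) : List Char → Option (List String)
  | [] => some expanded
  | flag :: rest =>
      if PySem.Set.contains allowed flag = false then none
      else pvExpandLoop allowed (expanded ++ [String.ofList ['-', flag]]) rest

def expand_short_flag_cluster (token : String) (allowed : PySem.Set Char) : Option (List String) :=
  if !(PySem.Str.startswith token "-") || PySem.Str.startswith token "--" || PySem.Str.len token < 2 then none
  else
    let flags := PySem.Str.slice token (some 1) none    -- token[1:]
    if PySem.Str.len flags = 0 then none                -- 'if not flags'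
    else pvExpandLoop allowed [] flags.toList

-- the 'for flag in flags' elif chain of _parse_uname_argv
def pvApplyFlag (d : PySem.Dict String Bool) (flag : String) : PySem.Dict String Bool :=
  if flag == "-a" then d.insert "all" true
  else if flag == "-s" then d.insert "kernel_name" true
  else if flag == "-n" then d.insert "node_name" true
  else if flag == "-r" then d.insert "kernel_release" true
  else if flag == "-v" then d.insert "kernel_version" true
  else if flag == "-m" then d.insert "machine" true
  else d

-- the 'for operand in operands' loop of _parse_uname_argv
def pvParseLoopA : List String → PySem.Dict String Bool → Option (PySem.Dict String Bool)
  | [], args => some args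
  | op :: rest, args =>
      if PySem.Str.startswith op "-" && op != "-" then
        match expand_short_flag_cluster op pvAllowedA with
        | none => none
        | some flags => pvParseLoopA rest (flags.foldl pvApplyFlag args)
      else none

def parse_uname_argv_py (operands : List String) : Option (List (String × Bool)) :=
  (pvParseLoopA operands (PySem.Dict.ofList
      [("all", false), ("kernel_name", false), ("node_name", false),
       ("kernel_release", false), ("kernel_version", false), ("machine", false)])).map
    PySem.Dict.items

-- ===== PORT B =====
def pvAllowedStr : String := "asnrvm"   -- _ALLOWED

def parse_uname_argv_py_alt (operands : List String) : Option (List (String × Bool)) :=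
  -- 'if any(len(t) < 2 or t[0] != "-" or t[1] == "-" for t in operands): return None'
  if operands.any (fun t =>
      decide (PySem.Str.len t < 2) || PySem.Str.pyGet? t 0 != some '-'
        || PySem.Str.pyGet? t 1 == some '-') then none
  else
    -- chars = "".join(t[1:] for t in operands)
    let chars := PySem.Str.join "" (operands.map (fun t => PySem.Str.slice t (some 1) none))
    -- 'if not set(chars) <= set(_ALLOWED): return None'
    if !(PySem.Set.issubset (PySem.Set.ofList chars.toList) (PySem.Set.ofList pvAllowedStr.toList)) then none
    else
      some [("all", PySem.Str.isIn "a" chars),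
            ("kernel_name", PySem.Str.isIn "s" chars),
            ("node_name", PySem.Str.isIn "n" chars),
            ("kernel_release", PySem.Str.isIn "r" chars),
            ("kernel_version", PySem.Str.isIn "v" chars),
            ("machine", PySem.Str.isIn "m" chars)]

-- ===== PRECONDITION & SPEC =====
def Spec_parse_uname_argv_py (operands : List String) (out : Option (List (String × Bool))) : Prop := out = parse_uname_argv_py_alt operands
instance (operands : List String) (out : Option (List (String × Bool))) : Decidable (Spec_parse_uname_argv_py operands out) := by unfold Spec_parse_uname_argv_py; infer_instance

-- ===== CLAIM (what is proved, stated in full; the proofs are below) =====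
def Claim_equal_parse_uname_argv_py : Prop := ∀ (operands : List String), Dom_parse_uname_argv_py operands → Spec_parse_uname_argv_py operands (parse_uname_argv_py operands)

-- ===== LEMMAS AND PROOFS =====

-- proof-side vocabulary
def pvTail (t : String) : List Char := (PySem.Str.slice t (some 1) none).toList
def pvShape (t : String) : Bool :=
  match t.toList with
  | '-' :: c :: _ => c != '-'
  | _ => false
def pvGoodB (ops : List String) : Bool :=
  ops.all (fun t => pvShape t && (pvTail t).all (PySem.Set.contains pvAllowedA))
def pvFlat (ops : List String) : List Char := (ops.map pvTail).flatten

-- the dict A maintains, as a function of the set of flag characters seen so far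
def pvDictOf (seen : PySem.Set Char) : PySem.Dict String Bool :=
  PySem.Dict.mk
    [("all", PySem.Set.contains seen 'a'),
     ("kernel_name", PySem.Set.contains seen 's'),
     ("node_name", PySem.Set.contains seen 'n'),
     ("kernel_release", PySem.Set.contains seen 'r'),
     ("kernel_version", PySem.Set.contains seen 'v'),
     ("machine", PySem.Set.contains seen 'm')]

theorem pvApplyFlag_dictOf (seen : PySem.Set Char) (c : Char)
    (hc : PySem.Set.contains pvAllowedA c = true) :
    pvApplyFlag (pvDictOf seen) (String.ofList ['-', c]) = pvDictOf (PySem.Set.add seen c) := by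
  have e : pvAllowedA = ['a', 's', 'n', 'r', 'v', 'm'] := by decide
  rw [PySem.Set.contains_iff, e] at hc
  simp only [List.mem_cons, List.not_mem_nil, or_false] at hc
  rcases hc with h | h | h | h | h | h <;> subst h <;>
    · apply PySem.Dict.ext
      simp [pvApplyFlag, pvDictOf, PySem.Dict.items_insert_of_contains]

theorem pvExpandLoop_spec (cs : List Char) (acc : List String) :
    pvExpandLoop pvAllowedA acc cs =
      if (∀ c ∈ cs, c ∈ pvAllowedA) then
        some (acc ++ cs.map (fun c => String.ofList ['-', c]))
      else none := by
  induction cs generalizing acc with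
  | nil => simp [pvExpandLoop]
  | cons c rest ih =>
      by_cases h : c ∈ pvAllowedA <;> simp [pvExpandLoop, h, ih]

theorem pvFold_applyFlag (cs : List Char) (seen : PySem.Set Char)
    (h : ∀ c ∈ cs, c ∈ pvAllowedA) :
    (cs.map (fun c => String.ofList ['-', c])).foldl pvApplyFlag (pvDictOf seen) =
      pvDictOf (cs.foldl PySem.Set.add seen) := by
  induction cs generalizing seen with
  | nil => simp
  | cons c rest ih =>
      simp only [List.mem_cons, forall_eq_or_imp] at h
      simp only [List.map_cons, List.foldl_cons]
      rw [pvApplyFlag_dictOf seen c ((PySem.Set.contains_iff _ _).mpr h.1), ih _ h.2]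

-- A's loop, characterized by shape-goodness and the flattened flag characters
theorem pvTail_eq (t : String) : pvTail t = t.toList.tail := by
  simp [pvTail, PySem.List.slice_from_one]

theorem pvMainA (ops : List String) (seen : PySem.Set Char) :
    pvParseLoopA ops (pvDictOf seen) =
      if pvGoodB ops then some (pvDictOf ((pvFlat ops).foldl PySem.Set.add seen)) else none := by
  induction ops generalizing seen with
  | nil => simp [pvParseLoopA, pvGoodB, pvFlat]
  | cons tok rest ih =>
      have hflat : pvFlat (tok :: rest) = pvTail tok ++ pvFlat rest := by simp [pvFlat]
      have hgcons : pvGoodB (tok :: rest) =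
          ((pvShape tok && (pvTail tok).all (PySem.Set.contains pvAllowedA)) && pvGoodB rest) := by
        simp [pvGoodB]
      rw [hgcons, hflat]
      simp only [pvParseLoopA, expand_short_flag_cluster, List.foldl_append]
      rcases hl : tok.toList with _ | ⟨c0, _ | ⟨c1, cs⟩⟩
      · have hs : pvShape tok = false := by simp [pvShape, hl]
        simp [hl, PySem.Chars.startswith, hs]
      · -- single-character token
        by_cases hc : c0 = '-'
        · subst hc
          have ht : tok = "-" := by
            have := congrArg String.ofList hl
            simpa using this
          subst ht
          have hs : pvShape "-" = false := by simp [pvShape]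
          simp [hs]
        · have hs : pvShape tok = false := by simp [pvShape, hl]
          simp [hl, PySem.Chars.startswith, hs]
      · -- token of length ≥ 2
        by_cases hc0 : c0 = '-'
        · subst hc0
          have hne : tok ≠ "-" := by
            intro e; rw [e] at hl; simp at hl
          by_cases hc1 : c1 = '-'
          · subst hc1
            have hs : pvShape tok = false := by simp [pvShape, hl]
            simp [hl, PySem.Chars.startswith, hne, hs]
          · have hc1' : ¬('-' = c1) := fun e => hc1 e.symm
            have htail : pvTail tok = c1 :: cs := by rw [pvTail_eq, hl]; rfl
            have hs : pvShape tok = true := by simp [pvShape, hl, hc1]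
            rw [htail, hs]
            have hnn : ¬((cs.length : Int) < 0) := by omega
            have hps : ¬(((cs.length : Int)) + 1 = 0) := by omega
            simp [hl, PySem.Chars.startswith, hne, hc1', pvExpandLoop_spec,
              PySem.List.slice_from_one, hnn, hps]
            by_cases hall : ∀ c ∈ c1 :: cs, c ∈ pvAllowedA
            · have hall' := List.forall_mem_cons.mp hall
              have hcontains : ((c1 :: cs).all (PySem.Set.contains pvAllowedA)) = true := by
                simp only [List.all_eq_true, PySem.Set.contains_iff]; exact hall
              rw [if_pos (show c1 ∈ pvAllowedA ∧ ∀ a ∈ cs, a ∈ pvAllowedA from ⟨hall'.1, hall'.2⟩)]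
              show pvParseLoopA rest
                  (List.foldl pvApplyFlag (pvDictOf seen)
                    (List.map (fun c => String.ofList ['-', c]) (c1 :: cs))) = _
              rw [pvFold_applyFlag _ _ hall, ih]
              simp [eq_true hall'.1, eq_true hall'.2]
            · rw [if_neg (fun h : c1 ∈ pvAllowedA ∧ ∀ a ∈ cs, a ∈ pvAllowedA =>
                    hall (List.forall_mem_cons.mpr ⟨h.1, h.2⟩))]
              rw [if_neg (fun h : (c1 ∈ pvAllowedA ∧ ∀ x ∈ cs, x ∈ pvAllowedA) ∧ pvGoodB rest = true =>
                    hall (List.forall_mem_cons.mpr ⟨h.1.1, h.1.2⟩))]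
        · have hs : pvShape tok = false := by simp [pvShape, hl, hc0]
          have hsw : PySem.Chars.startswith tok.toList ['-'] = false := by
            rw [← Bool.not_eq_true, PySem.Chars.startswith_iff, hl]
            intro h
            exact hc0 (List.cons_prefix_cons.mp h).1.symm
          simp [hs, PySem.Str.startswith, hsw]

theorem pvIsIn_single (c : Char) (l : List Char) :
    PySem.Chars.isIn [c] l = l.contains c := by
  rcases Bool.eq_false_or_eq_true (l.contains c) with h | h <;> rw [h]
  · rw [PySem.Chars.isIn_iff_infix]
    simp only [List.contains_eq_mem, decide_eq_true_eq] at h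
    obtain ⟨s, t, rfl⟩ := List.append_of_mem h
    exact ⟨s, t, by simp⟩
  · rw [PySem.Chars.isIn_eq_false_iff]
    intro hinf
    have : c ∈ l := hinf.mem (by simp)
    simp [List.contains_eq_mem] at h; exact absurd this h

theorem pvJoin_nil_flatten (l : List (List Char)) : PySem.Chars.join [] l = l.flatten := by
  simp only [PySem.Chars.join, List.intercalate]
  induction l with
  | nil => simp
  | cons x rest ih => cases rest <;> simp_all [List.intersperse]

-- B's per-token shape test is the negation of pvShape
theorem pvShapeBadList (l : List Char) :
    (decide ((l.length : Int) < 2) || PySem.List.pyGet? l 0 != some '-' || PySem.List.pyGet? l 1 == some '-')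
      = !(match l with | '-' :: c :: _ => c != '-' | _ => false) := by
  rcases l with _ | ⟨c0, _ | ⟨c1, cs⟩⟩
  · simp [PySem.List.pyGet?]
  · simp [PySem.List.pyGet?]
  · have h0 : PySem.List.pyGet? (c0 :: c1 :: cs) ((0:Nat):Int) = (c0 :: c1 :: cs)[(0:Nat)]? :=
      PySem.List.pyGet?_natCast _ 0
    have hnn : ¬((cs.length : Int) < 0) := by omega
    simp only [show ((0:Nat):Int) = (0:Int) from rfl] at h0
    simp [h0, hnn]
    by_cases hc0 : c0 = '-' <;> by_cases hc1 : c1 = '-' <;> simp [hc0, hc1, bne]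

theorem pvShapeBad_eq (t : String) :
    (decide (PySem.Str.len t < 2) || PySem.Str.pyGet? t 0 != some '-'
      || PySem.Str.pyGet? t 1 == some '-') = !pvShape t := by
  have := pvShapeBadList t.toList
  simpa [PySem.Str.len_eq, pvShape] using this

-- the joined flag string is the flattened tails
theorem pvChars_eq (ops : List String) :
    (PySem.Str.join "" (ops.map (fun t => PySem.Str.slice t (some 1) none))).toList = pvFlat ops := by
  rw [PySem.Str.toList_join]
  show PySem.Chars.join [] _ = _
  rw [pvJoin_nil_flatten, pvFlat, List.map_map]
  rfl

-- ===== VERDICT (by name: the statement is the Claim_ definition above) =====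
theorem parse_uname_argv_py_spec : Claim_equal_parse_uname_argv_py := by
  intro operands _
  unfold Spec_parse_uname_argv_py parse_uname_argv_py parse_uname_argv_py_alt
  have h0 : PySem.Dict.ofList
      [("all", false), ("kernel_name", false), ("node_name", false),
       ("kernel_release", false), ("kernel_version", false), ("machine", false)] =
      pvDictOf PySem.Set.empty := by decide
  rw [h0, pvMainA]
  simp only [pvShapeBad_eq]
  by_cases hbad : operands.any (fun t => !pvShape t)
  · -- some token fails the shape test: both sides are none
    have hgood : pvGoodB operands = false := by
      rw [← Bool.not_eq_true]
      simp only [pvGoodB, List.all_eq_true, Bool.and_eq_true]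
      intro hall
      rcases List.any_eq_true.mp hbad with ⟨t, ht, hbt⟩
      rw [(hall t ht).1] at hbt
      simp at hbt
    simp [hbad, hgood]
  · -- every token passes the shape test
    have hshape : ∀ t ∈ operands, pvShape t = true := by
      intro t ht
      by_contra hcon
      have hf : pvShape t = false := Bool.eq_false_iff.mpr hcon
      exact hbad (List.any_eq_true.mpr ⟨t, ht, by simp [hf]⟩)
    rw [if_neg hbad]
    simp only [pvChars_eq]
    have hsub : (PySem.Set.issubset (PySem.Set.ofList (pvFlat operands))
        (PySem.Set.ofList pvAllowedStr.toList)) = (pvFlat operands).all (PySem.Set.contains pvAllowedA) := by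
      rw [Bool.eq_iff_iff, PySem.Set.issubset_iff]
      simp only [List.all_eq_true, PySem.Set.contains_iff]
      constructor
      · intro h c hc
        have := h c ((PySem.Set.mem_ofList _ _).mpr hc)
        rw [PySem.Set.mem_ofList] at this
        rw [show pvAllowedA = PySem.Set.ofList ['a','s','n','r','v','m'] from rfl, PySem.Set.mem_ofList]
        simpa [pvAllowedStr] using this
      · intro h c hc
        rw [PySem.Set.mem_ofList] at hc
        have := h c hc
        rw [show pvAllowedA = PySem.Set.ofList ['a','s','n','r','v','m'] from rfl, PySem.Set.mem_ofList] at this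
        rw [PySem.Set.mem_ofList]
        simpa [pvAllowedStr] using this
    have hgood : pvGoodB operands = (pvFlat operands).all (PySem.Set.contains pvAllowedA) := by
      rw [Bool.eq_iff_iff]
      simp only [pvGoodB, pvFlat, List.all_flatten, List.all_map, Function.comp_apply,
        List.all_eq_true, Bool.and_eq_true]
      exact ⟨fun h t ht => (h t ht).2, fun h t ht => ⟨hshape t ht, h t ht⟩⟩
    rw [hsub, hgood]
    rcases Bool.eq_false_or_eq_true ((pvFlat operands).all (PySem.Set.contains pvAllowedA)) with hall | hall
    · have hcj : (PySem.Chars.join []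
          (List.map (String.toList ∘ fun t => PySem.Str.slice t (some 1) none) operands)) = pvFlat operands := by
        rw [← List.map_map, show ([] : List Char) = ("" : String).toList from rfl,
          ← PySem.Str.toList_join]
        exact pvChars_eq operands
      simp [hall, PySem.Str.isIn_eq]
      rw [hcj]
      simp [pvIsIn_single, pvDictOf, ← PySem.Set.ofList_eq_foldl,
        PySem.Set.mem_ofList]
    · simp [hall]
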